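-- pv_equiv track=rewrite | github.com/albal/cyber | apps/worker/src/cyberscan_worker/compliance.py | compliance_tags
-- ===== SOURCE A (Python) =====
-- _OWASP_BY_CWE = {
--     "CWE-79": "OWASP A03:2021 Injection",
--     "CWE-89": "OWASP A03:2021 Injection",
--     "CWE-94": "OWASP A03:2021 Injection",
--     "CWE-352": "OWASP A01:2021 Broken Access Control",
--     "CWE-285": "OWASP A01:2021 Broken Access Control",
--     "CWE-287": "OWASP A07:2021 Identification & Authentication Failures",
--     "CWE-200": "OWASP A04:2021 Insecure Design",
--     "CWE-22": "OWASP A01:2021 Broken Access Control",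
--     "CWE-918": "OWASP A10:2021 SSRF",
--     "CWE-502": "OWASP A08:2021 Software & Data Integrity",
--     "CWE-310": "OWASP A02:2021 Cryptographic Failures",
--     "CWE-319": "OWASP A02:2021 Cryptographic Failures",
--     "CWE-327": "OWASP A02:2021 Cryptographic Failures",
--     "CWE-693": "OWASP A05:2021 Security Misconfiguration",
--     "CWE-1004": "OWASP A05:2021 Security Misconfiguration",
-- }
--
-- _PCI_BY_CWE = {
--     "CWE-79": "PCI-DSS 6.5.7",
--     "CWE-89": "PCI-DSS 6.5.1",
--     "CWE-310": "PCI-DSS 4.2.1",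
--     "CWE-319": "PCI-DSS 4.2.1",
--     "CWE-327": "PCI-DSS 4.2.1",
-- }
--
-- _NIST_BY_CWE = {
--     "CWE-310": "NIST SC-13",
--     "CWE-319": "NIST SC-8",
--     "CWE-327": "NIST SC-13",
--     "CWE-287": "NIST IA-2",
--     "CWE-200": "NIST SC-28",
-- }
--
-- _CIS_BY_CWE = {
--     # Injection / XSS — secure software dev practices
--     "CWE-79": "CIS 16.10",        # Apply secure design principles in app architecture
--     "CWE-89": "CIS 16.10",
--     "CWE-94": "CIS 16.10",
--     "CWE-502": "CIS 16.10",
--     # Access control / authentication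
--     "CWE-352": "CIS 6.1",         # Establish access control granting / management
--     "CWE-285": "CIS 6.1",
--     "CWE-287": "CIS 6.5",         # Require MFA for administrative access
--     "CWE-22":  "CIS 6.1",
--     # Information disclosure — data classification + protection
--     "CWE-200": "CIS 3.1",         # Establish and maintain data inventory
--     "CWE-918": "CIS 13.10",       # Apply network filtering for SSRF
--     # Cryptographic / TLS hygiene
--     "CWE-310": "CIS 3.10",        # Encrypt sensitive data in transit
--     "CWE-319": "CIS 3.10",
--     "CWE-327": "CIS 3.10",
--     # Security misconfiguration / hardening
--     "CWE-693": "CIS 4.1",         # Establish and maintain a secure config process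
--     "CWE-1004": "CIS 4.1",
-- }
--
-- def compliance_tags(cwe_ids: list[str]) -> list[str]:
--     """Return de-duplicated compliance tags (preserving insertion order)."""
--     tags: list[str] = []
--     for c in cwe_ids:
--         c_up = c.upper()
--         if c_up in _OWASP_BY_CWE:
--             tags.append(_OWASP_BY_CWE[c_up])
--         if c_up in _PCI_BY_CWE:
--             tags.append(_PCI_BY_CWE[c_up])
--         if c_up in _NIST_BY_CWE:
--             tags.append(_NIST_BY_CWE[c_up])
--         if c_up in _CIS_BY_CWE:
--             tags.append(_CIS_BY_CWE[c_up])
--     seen: set[str] = set()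
--     out: list[str] = []
--     for t in tags:
--         if t not in seen:
--             seen.add(t)
--             out.append(t)
--     return out
-- ===== SOURCE B (Python) =====
-- # B: single backward pass, no seen-set: build the result back-to-front, merging each
-- # id's tag block in front and filtering tags it shadows out of the suffix result.
-- _TAGS_BY_CWE = {
--     "CWE-79": ["OWASP A03:2021 Injection", "PCI-DSS 6.5.7", "CIS 16.10"],
--     "CWE-89": ["OWASP A03:2021 Injection", "PCI-DSS 6.5.1", "CIS 16.10"],
--     "CWE-94": ["OWASP A03:2021 Injection", "CIS 16.10"],
--     "CWE-352": ["OWASP A01:2021 Broken Access Control", "CIS 6.1"],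
--     "CWE-285": ["OWASP A01:2021 Broken Access Control", "CIS 6.1"],
--     "CWE-287": ["OWASP A07:2021 Identification & Authentication Failures", "NIST IA-2", "CIS 6.5"],
--     "CWE-200": ["OWASP A04:2021 Insecure Design", "NIST SC-28", "CIS 3.1"],
--     "CWE-22": ["OWASP A01:2021 Broken Access Control", "CIS 6.1"],
--     "CWE-918": ["OWASP A10:2021 SSRF", "CIS 13.10"],
--     "CWE-502": ["OWASP A08:2021 Software & Data Integrity", "CIS 16.10"],
--     "CWE-310": ["OWASP A02:2021 Cryptographic Failures", "PCI-DSS 4.2.1", "NIST SC-13", "CIS 3.10"],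
--     "CWE-319": ["OWASP A02:2021 Cryptographic Failures", "PCI-DSS 4.2.1", "NIST SC-8", "CIS 3.10"],
--     "CWE-327": ["OWASP A02:2021 Cryptographic Failures", "PCI-DSS 4.2.1", "NIST SC-13", "CIS 3.10"],
--     "CWE-693": ["OWASP A05:2021 Security Misconfiguration", "CIS 4.1"],
--     "CWE-1004": ["OWASP A05:2021 Security Misconfiguration", "CIS 4.1"],
-- }
--
-- def compliance_tags(cwe_ids: list[str]) -> list[str]:
--     """Return de-duplicated compliance tags (preserving insertion order)."""
--     out: list[str] = []
--     for c in reversed(cwe_ids):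
--         block = _TAGS_BY_CWE.get(c.upper(), [])
--         out = block + [t for t in out if t not in block]
--     return out
-- ===== Notes on version B (the rewrite author's own statement) =====
-- stated objective: alternative
-- what changed: Replaces A's forward tag-collecting pass plus separate seen-set dedup pass with a single backward pass over a combined CWE->tag-list index that builds the result back-to-front, prepending each id's block and filtering shadowed duplicates from the suffix result, with no seen set at all.
import Mathlib
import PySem

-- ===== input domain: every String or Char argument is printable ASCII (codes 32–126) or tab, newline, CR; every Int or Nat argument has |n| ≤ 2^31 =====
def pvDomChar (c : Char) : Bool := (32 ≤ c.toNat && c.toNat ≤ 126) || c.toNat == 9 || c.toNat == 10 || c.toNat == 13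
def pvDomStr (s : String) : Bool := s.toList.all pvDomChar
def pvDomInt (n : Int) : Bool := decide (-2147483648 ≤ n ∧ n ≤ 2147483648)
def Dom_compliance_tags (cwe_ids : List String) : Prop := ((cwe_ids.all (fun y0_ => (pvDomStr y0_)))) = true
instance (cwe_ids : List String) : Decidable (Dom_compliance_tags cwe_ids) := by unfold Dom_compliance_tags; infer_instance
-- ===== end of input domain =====

-- B replaces A's forward collect-then-dedup (seen set) by a single backward pass over a combined
-- CWE -> tag-list index, building the result back-to-front with no seen set (objective: alternative).

-- ===== PORT A =====
def owaspList : List (String × String) := [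
  ("CWE-79", "OWASP A03:2021 Injection"),
  ("CWE-89", "OWASP A03:2021 Injection"),
  ("CWE-94", "OWASP A03:2021 Injection"),
  ("CWE-352", "OWASP A01:2021 Broken Access Control"),
  ("CWE-285", "OWASP A01:2021 Broken Access Control"),
  ("CWE-287", "OWASP A07:2021 Identification & Authentication Failures"),
  ("CWE-200", "OWASP A04:2021 Insecure Design"),
  ("CWE-22", "OWASP A01:2021 Broken Access Control"),
  ("CWE-918", "OWASP A10:2021 SSRF"),
  ("CWE-502", "OWASP A08:2021 Software & Data Integrity"),
  ("CWE-310", "OWASP A02:2021 Cryptographic Failures"),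
  ("CWE-319", "OWASP A02:2021 Cryptographic Failures"),
  ("CWE-327", "OWASP A02:2021 Cryptographic Failures"),
  ("CWE-693", "OWASP A05:2021 Security Misconfiguration"),
  ("CWE-1004", "OWASP A05:2021 Security Misconfiguration")]

def owaspByCwe : PySem.Dict String String := PySem.Dict.ofList owaspList

def pciList : List (String × String) := [
  ("CWE-79", "PCI-DSS 6.5.7"),
  ("CWE-89", "PCI-DSS 6.5.1"),
  ("CWE-310", "PCI-DSS 4.2.1"),
  ("CWE-319", "PCI-DSS 4.2.1"),
  ("CWE-327", "PCI-DSS 4.2.1")]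

def pciByCwe : PySem.Dict String String := PySem.Dict.ofList pciList

def nistList : List (String × String) := [
  ("CWE-310", "NIST SC-13"),
  ("CWE-319", "NIST SC-8"),
  ("CWE-327", "NIST SC-13"),
  ("CWE-287", "NIST IA-2"),
  ("CWE-200", "NIST SC-28")]

def nistByCwe : PySem.Dict String String := PySem.Dict.ofList nistList

def cisList : List (String × String) := [
  ("CWE-79", "CIS 16.10"),
  ("CWE-89", "CIS 16.10"),
  ("CWE-94", "CIS 16.10"),
  ("CWE-502", "CIS 16.10"),
  ("CWE-352", "CIS 6.1"),
  ("CWE-285", "CIS 6.1"),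
  ("CWE-287", "CIS 6.5"),
  ("CWE-22", "CIS 6.1"),
  ("CWE-200", "CIS 3.1"),
  ("CWE-918", "CIS 13.10"),
  ("CWE-310", "CIS 3.10"),
  ("CWE-319", "CIS 3.10"),
  ("CWE-327", "CIS 3.10"),
  ("CWE-693", "CIS 4.1"),
  ("CWE-1004", "CIS 4.1")]

def cisByCwe : PySem.Dict String String := PySem.Dict.ofList cisList

-- 'if c_up in d: tags.append(d[c_up])' ported as a match on d.get? c_up (membership test + lookup fused; exact)
def compliance_tags (cwe_ids : List String) : List String :=
  let tags : List String := cwe_ids.foldl (fun tags c =>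
    let c_up := PySem.Str.upper c
    let tags := match owaspByCwe.get? c_up with | some t => tags ++ [t] | none => tags
    let tags := match pciByCwe.get? c_up with | some t => tags ++ [t] | none => tags
    let tags := match nistByCwe.get? c_up with | some t => tags ++ [t] | none => tags
    match cisByCwe.get? c_up with | some t => tags ++ [t] | none => tags) []
  (tags.foldl (fun (st : PySem.Set String × List String) t =>
      if PySem.Set.contains st.1 t then st else (PySem.Set.add st.1 t, st.2 ++ [t]))
    (PySem.Set.empty, [])).2

-- ===== PORT B =====
def combinedList : List (String × List String) := [
  ("CWE-79", ["OWASP A03:2021 Injection", "PCI-DSS 6.5.7", "CIS 16.10"]),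
  ("CWE-89", ["OWASP A03:2021 Injection", "PCI-DSS 6.5.1", "CIS 16.10"]),
  ("CWE-94", ["OWASP A03:2021 Injection", "CIS 16.10"]),
  ("CWE-352", ["OWASP A01:2021 Broken Access Control", "CIS 6.1"]),
  ("CWE-285", ["OWASP A01:2021 Broken Access Control", "CIS 6.1"]),
  ("CWE-287", ["OWASP A07:2021 Identification & Authentication Failures", "NIST IA-2", "CIS 6.5"]),
  ("CWE-200", ["OWASP A04:2021 Insecure Design", "NIST SC-28", "CIS 3.1"]),
  ("CWE-22", ["OWASP A01:2021 Broken Access Control", "CIS 6.1"]),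
  ("CWE-918", ["OWASP A10:2021 SSRF", "CIS 13.10"]),
  ("CWE-502", ["OWASP A08:2021 Software & Data Integrity", "CIS 16.10"]),
  ("CWE-310", ["OWASP A02:2021 Cryptographic Failures", "PCI-DSS 4.2.1", "NIST SC-13", "CIS 3.10"]),
  ("CWE-319", ["OWASP A02:2021 Cryptographic Failures", "PCI-DSS 4.2.1", "NIST SC-8", "CIS 3.10"]),
  ("CWE-327", ["OWASP A02:2021 Cryptographic Failures", "PCI-DSS 4.2.1", "NIST SC-13", "CIS 3.10"]),
  ("CWE-693", ["OWASP A05:2021 Security Misconfiguration", "CIS 4.1"]),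
  ("CWE-1004", ["OWASP A05:2021 Security Misconfiguration", "CIS 4.1"])]

def tagsByCwe : PySem.Dict String (List String) := PySem.Dict.ofList combinedList

-- 'for c in reversed(cwe_ids): out = block + [t for t in out if t not in block]'
def compliance_tags_alt (cwe_ids : List String) : List String :=
  cwe_ids.reverse.foldl (fun out c =>
    let block := tagsByCwe.getD (PySem.Str.upper c) []
    block ++ out.filter (fun t => !block.contains t)) []

-- ===== PRECONDITION & SPEC =====
def Spec_compliance_tags (cwe_ids : List String) (out : List String) : Prop := out = compliance_tags_alt cwe_ids
instance (cwe_ids : List String) (out : List String) : Decidable (Spec_compliance_tags cwe_ids out) := by unfold Spec_compliance_tags; infer_instance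

-- ===== CLAIM (what is proved, stated in full; the proofs are below) =====
def Claim_equal_compliance_tags : Prop := ∀ (cwe_ids : List String), Dom_compliance_tags cwe_ids → Spec_compliance_tags cwe_ids (compliance_tags cwe_ids)

-- ===== LEMMAS AND PROOFS =====

-- first-occurrence dedup, the common description of both results
def fdedup : List String → List String
  | [] => []
  | x :: l => x :: fdedup (l.filter (fun t => t != x))
termination_by l => l.length
decreasing_by
  simpa using Nat.lt_succ_of_le (List.length_filter_le _ l)

lemma fdedup_nil : fdedup [] = [] := by rw [fdedup]

lemma fdedup_cons (x : String) (l : List String) :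
    fdedup (x :: l) = x :: fdedup (l.filter (fun t => t != x)) := by rw [fdedup]

-- tags contributed by one id in A (in A's append order)
def tagsOfA (s : String) : List String :=
  ((owaspByCwe.get? s).toList) ++ ((pciByCwe.get? s).toList) ++
  ((nistByCwe.get? s).toList) ++ ((cisByCwe.get? s).toList)

lemma owasp_mk : owaspByCwe = PySem.Dict.mk owaspList := by rfl
lemma pci_mk : pciByCwe = PySem.Dict.mk pciList := by rfl
lemma nist_mk : nistByCwe = PySem.Dict.mk nistList := by rfl
lemma cis_mk : cisByCwe = PySem.Dict.mk cisList := by rfl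
lemma combined_mk : tagsByCwe = PySem.Dict.mk combinedList := by rfl

-- A's four probes on one id produce exactly the combined index's entry for it
lemma perKey (s : String) : tagsOfA s = tagsByCwe.getD s [] := by
  by_cases h1 : s = "CWE-79"
  · subst h1; decide
  by_cases h2 : s = "CWE-89"
  · subst h2; decide
  by_cases h3 : s = "CWE-94"
  · subst h3; decide
  by_cases h4 : s = "CWE-352"
  · subst h4; decide
  by_cases h5 : s = "CWE-285"
  · subst h5; decide
  by_cases h6 : s = "CWE-287"
  · subst h6; decide
  by_cases h7 : s = "CWE-200"
  · subst h7; decide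
  by_cases h8 : s = "CWE-22"
  · subst h8; decide
  by_cases h9 : s = "CWE-918"
  · subst h9; decide
  by_cases h10 : s = "CWE-502"
  · subst h10; decide
  by_cases h11 : s = "CWE-310"
  · subst h11; decide
  by_cases h12 : s = "CWE-319"
  · subst h12; decide
  by_cases h13 : s = "CWE-327"
  · subst h13; decide
  by_cases h14 : s = "CWE-693"
  · subst h14; decide
  by_cases h15 : s = "CWE-1004"
  · subst h15; decide
  simp [tagsOfA, owasp_mk, pci_mk, nist_mk, cis_mk, combined_mk,
    owaspList, pciList, nistList, cisList, combinedList,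
    PySem.Dict.getD_eq_get?_getD, PySem.Dict.get?,
    Ne.symm h1, Ne.symm h2, Ne.symm h3, Ne.symm h4, Ne.symm h5, Ne.symm h6, Ne.symm h7, Ne.symm h8, Ne.symm h9, Ne.symm h10, Ne.symm h11, Ne.symm h12, Ne.symm h13, Ne.symm h14, Ne.symm h15]

-- each combined-index entry is duplicate-free
lemma nodup_block (s : String) : (tagsByCwe.getD s []).Nodup := by
  by_cases h1 : s = "CWE-79"
  · subst h1; decide
  by_cases h2 : s = "CWE-89"
  · subst h2; decide
  by_cases h3 : s = "CWE-94"
  · subst h3; decide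
  by_cases h4 : s = "CWE-352"
  · subst h4; decide
  by_cases h5 : s = "CWE-285"
  · subst h5; decide
  by_cases h6 : s = "CWE-287"
  · subst h6; decide
  by_cases h7 : s = "CWE-200"
  · subst h7; decide
  by_cases h8 : s = "CWE-22"
  · subst h8; decide
  by_cases h9 : s = "CWE-918"
  · subst h9; decide
  by_cases h10 : s = "CWE-502"
  · subst h10; decide
  by_cases h11 : s = "CWE-310"
  · subst h11; decide
  by_cases h12 : s = "CWE-319"
  · subst h12; decide
  by_cases h13 : s = "CWE-327"
  · subst h13; decide
  by_cases h14 : s = "CWE-693"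
  · subst h14; decide
  by_cases h15 : s = "CWE-1004"
  · subst h15; decide
  simp [combined_mk, combinedList,
    PySem.Dict.getD_eq_get?_getD, PySem.Dict.get?,
    Ne.symm h1, Ne.symm h2, Ne.symm h3, Ne.symm h4, Ne.symm h5, Ne.symm h6, Ne.symm h7, Ne.symm h8, Ne.symm h9, Ne.symm h10, Ne.symm h11, Ne.symm h12, Ne.symm h13, Ne.symm h14, Ne.symm h15]

-- A's first loop body appends tagsOfA of the upper-cased id
lemma bodyA (tags : List String) (c : String) :
    (let c_up := PySem.Str.upper c
     let tags := match owaspByCwe.get? c_up with | some t => tags ++ [t] | none => tags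
     let tags := match pciByCwe.get? c_up with | some t => tags ++ [t] | none => tags
     let tags := match nistByCwe.get? c_up with | some t => tags ++ [t] | none => tags
     match cisByCwe.get? c_up with | some t => tags ++ [t] | none => tags)
    = tags ++ tagsOfA (PySem.Str.upper c) := by
  simp only [tagsOfA]
  cases owaspByCwe.get? (PySem.Str.upper c) <;>
    cases pciByCwe.get? (PySem.Str.upper c) <;>
    cases nistByCwe.get? (PySem.Str.upper c) <;>
    cases cisByCwe.get? (PySem.Str.upper c) <;> simp

-- A's first loop builds the flattened per-id tag stream
lemma tagsA_flat (xs : List String) (acc : List String) :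
    xs.foldl (fun tags c =>
      let c_up := PySem.Str.upper c
      let tags := match owaspByCwe.get? c_up with | some t => tags ++ [t] | none => tags
      let tags := match pciByCwe.get? c_up with | some t => tags ++ [t] | none => tags
      let tags := match nistByCwe.get? c_up with | some t => tags ++ [t] | none => tags
      match cisByCwe.get? c_up with | some t => tags ++ [t] | none => tags) acc
    = acc ++ xs.flatMap (fun c => tagsOfA (PySem.Str.upper c)) := by
  induction xs generalizing acc with
  | nil => simp
  | cons x xs ih => rw [List.foldl_cons, bodyA, List.flatMap_cons, ih, List.append_assoc]

-- A's seen-set pass is fdedup of the not-yet-seen elements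
lemma a_dedup (l : List String) (s : PySem.Set String) (acc : List String) :
    (l.foldl (fun (st : PySem.Set String × List String) t =>
        if PySem.Set.contains st.1 t then st else (PySem.Set.add st.1 t, st.2 ++ [t])) (s, acc)).2
    = acc ++ fdedup (l.filter (fun t => !PySem.Set.contains s t)) := by
  induction l generalizing s acc with
  | nil => simp [fdedup_nil]
  | cons x l ih =>
    by_cases h : x ∈ s
    · have hc : PySem.Set.contains s x = true := by
        simp [PySem.Set.contains, List.contains_eq_mem, h]
      rw [List.foldl_cons, if_pos hc, List.filter_cons, if_neg (by simp [h]), ih]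
    · have hc : PySem.Set.contains s x = false := by
        simp [PySem.Set.contains, List.contains_eq_mem, h]
      have hAdd : PySem.Set.add s x = s ++ [x] := by
        simp [PySem.Set.add, h]
      have hpred : ∀ t, (!PySem.Set.contains (PySem.Set.add s x) t)
          = ((!PySem.Set.contains s t) && (t != x)) := by
        intro t
        rw [hAdd]
        by_cases ht : t = x
        · subst ht; simp [PySem.Set.contains, List.contains_eq_mem, bne]
        · by_cases hts : t ∈ s <;>
            simp [PySem.Set.contains, List.contains_eq_mem, ht, hts, bne]
      rw [List.foldl_cons, if_neg (by simp [h]), ih, List.filter_cons,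
        if_pos (by simp [h]), fdedup_cons]
      have hfe : (l.filter (fun t => !PySem.Set.contains (PySem.Set.add s x) t))
          = (l.filter (fun t => !PySem.Set.contains s t)).filter (fun t => t != x) := by
        rw [List.filter_filter]
        apply List.filter_congr
        intro t _
        rw [hpred t, Bool.and_comm]
      rw [hfe]
      simp

-- fdedup commutes with filter
lemma fdedup_filter : ∀ (n : ℕ) (l : List String), l.length ≤ n →
    ∀ (p : String → Bool), fdedup (l.filter p) = (fdedup l).filter p := by
  intro n
  induction n with
  | zero =>
    intro l hl p
    have : l = [] := List.eq_nil_of_length_eq_zero (Nat.le_zero.mp hl)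
    subst this; simp [fdedup_nil]
  | succ n ih =>
    intro l hl p
    cases l with
    | nil => simp [fdedup_nil]
    | cons x l =>
      have hlen : l.length ≤ n := Nat.lt_succ_iff.mp (by simpa using hl)
      have hlen' : (l.filter (fun t => t != x)).length ≤ n :=
        le_trans (List.length_filter_le _ _) hlen
      by_cases hp : p x
      · rw [List.filter_cons, if_pos hp, fdedup_cons, fdedup_cons, List.filter_cons, if_pos hp]
        congr 1
        rw [List.filter_filter, ← ih _ hlen' p, List.filter_filter]
        congr 1
        apply List.filter_congr
        intro a _
        exact Bool.and_comm _ _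
      · rw [List.filter_cons, if_neg (by simpa using hp), fdedup_cons, List.filter_cons,
          if_neg (by simpa using hp), ← ih _ hlen' p]
        congr 1
        rw [List.filter_filter]
        apply List.filter_congr
        intro t _
        by_cases ht : t = x
        · subst ht; simp [bne, hp]
        · simp [bne, ht]

-- merging a duplicate-free block in front commutes with fdedup
lemma fdedup_append (b : List String) (hb : b.Nodup) (l : List String) :
    fdedup (b ++ l) = b ++ (fdedup l).filter (fun t => !b.contains t) := by
  induction b generalizing l with
  | nil => simp
  | cons x b ih =>
    have hx : x ∉ b := (List.nodup_cons.mp hb).1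
    have hb' : b.Nodup := (List.nodup_cons.mp hb).2
    rw [List.cons_append, fdedup_cons, List.filter_append]
    have hbf : b.filter (fun t => t != x) = b := by
      apply List.filter_eq_self.mpr
      intro t ht
      have hne : t ≠ x := fun e => hx (e ▸ ht)
      simp [bne, hne]
    rw [hbf, ih hb', fdedup_filter l.length l le_rfl]
    simp only [List.cons_append, List.cons.injEq, true_and]
    congr 1
    rw [List.filter_filter]
    apply List.filter_congr
    intro t _
    show ((!b.contains t) && (t != x)) = !(x :: b).contains t
    by_cases ht : t = x
    · subst ht
      by_cases hc : t ∈ b <;> simp [hc, bne]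
    · by_cases hc : t ∈ b <;> simp [ht, hc, bne]

-- B's backward pass computes fdedup of the flattened stream
lemma b_foldr (xs : List String) :
    xs.foldr (fun c out =>
      let block := tagsByCwe.getD (PySem.Str.upper c) []
      block ++ out.filter (fun t => !block.contains t)) []
    = fdedup (xs.flatMap (fun c => tagsByCwe.getD (PySem.Str.upper c) [])) := by
  induction xs with
  | nil => simp [fdedup_nil]
  | cons x xs ih =>
    rw [List.foldr_cons, List.flatMap_cons,
      fdedup_append _ (nodup_block (PySem.Str.upper x)), ih]

-- ===== VERDICT (by name: the statement is the Claim_ definition above) =====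
theorem compliance_tags_spec : Claim_equal_compliance_tags := by
  intro cwe_ids _
  show compliance_tags cwe_ids = compliance_tags_alt cwe_ids
  unfold compliance_tags compliance_tags_alt
  rw [List.foldl_reverse]
  simp only []
  rw [tagsA_flat, List.nil_append, a_dedup]
  have hfilt : (cwe_ids.flatMap (fun c => tagsOfA (PySem.Str.upper c))).filter
      (fun t => !PySem.Set.contains PySem.Set.empty t)
      = cwe_ids.flatMap (fun c => tagsOfA (PySem.Str.upper c)) := by
    apply List.filter_eq_self.mpr
    intro t _
    rfl
  rw [hfilt]
  have : (fun (c : String) (out : List String) =>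
      let block := tagsByCwe.getD (PySem.Str.upper c) []
      block ++ out.filter (fun t => !block.contains t))
      = (fun c out =>
      let block := tagsByCwe.getD (PySem.Str.upper c) []
      block ++ out.filter (fun t => !block.contains t)) := rfl
  rw [b_foldr]
  simp only [List.nil_append, perKey]
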